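-- pv_equiv track=rewrite | github.com/Li-ionFractalNanocore/Leetcode | exercise/sliding-window/2516/1.py | takeCharacters
-- ===== SOURCE A (Python) =====
-- def takeCharacters(s: str, k: int) -> int:
--     n = len(s)
--     counter = {'a': 0, 'b': 0, 'c': 0}
--     for i in range(n):
--         counter[s[i]] += 1
--     for key, v in counter.items():
--         if v < k:
--             return -1
--
--     result = n
--     full = 3
--     r = 0
--     for l in range(n):
--         while r < n and full == 3:
--             if counter[s[r]] > k:
--                 counter[s[r]] -= 1
--                 r += 1
--             else:
--                 break
--         result = min(result, l + n - r)
--         counter[s[l]] += 1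
--     return result
-- ===== SOURCE B (Python) =====
-- def takeCharacters(s, k):
--     n = len(s)
--     if s.count('a') < k or s.count('b') < k or s.count('c') < k:
--         return -1
--     pos = {'a': [], 'b': [], 'c': []}
--     for idx, ch in enumerate(s):
--         if ch in pos:
--             pos[ch].append(idx)
--     best = n
--     cnt = {'a': 0, 'b': 0, 'c': 0}
--     for i in range(n + 1):
--         j = 0
--         for ch in 'abc':
--             need = k - cnt[ch]
--             if need > 0:
--                 p = pos[ch][len(pos[ch]) - need]
--                 j = max(j, n - p)
--         if i + j <= n:
--             best = min(best, i + j)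
--         if i < n and s[i] in cnt:
--             cnt[s[i]] += 1
--     return best
-- ===== Notes on version B (the rewrite author's own statement) =====
-- stated objective: alternative
-- what changed: Replaces A's amortized shrinking-window with a mutable shared counter by a counting/indexing scheme: precomputed occurrence-position lists per character give, for each prefix length i, the minimal suffix length by direct index lookup (position of the need-th occurrence from the right), with no window pointer and no decrement/re-increment of a shared counter.
-- crash fix: On strings containing any character other than 'a','b','c' A raises KeyError in its counting loop; B treats such characters as deletable filler and returns the correct minimum number of end-deletions (e.g. -1 when some of a/b/c is scarcer than k). — e.g. on takeCharacters("axbc", 1): A raises KeyError, B returns 3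
import Mathlib
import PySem

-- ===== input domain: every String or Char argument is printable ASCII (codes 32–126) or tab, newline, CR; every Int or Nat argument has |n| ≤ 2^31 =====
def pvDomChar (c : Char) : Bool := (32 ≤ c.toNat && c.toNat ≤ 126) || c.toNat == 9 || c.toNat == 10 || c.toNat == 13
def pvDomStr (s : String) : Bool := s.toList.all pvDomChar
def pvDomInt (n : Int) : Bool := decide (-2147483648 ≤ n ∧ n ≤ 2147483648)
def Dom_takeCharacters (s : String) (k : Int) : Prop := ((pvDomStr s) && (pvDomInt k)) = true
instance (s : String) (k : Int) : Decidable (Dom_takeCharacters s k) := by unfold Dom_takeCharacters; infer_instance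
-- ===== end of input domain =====

-- B replaces A's amortized shrinking-window (shared mutable counter, two pointers) by per-character
-- occurrence-position lists: for each prefix length the minimal suffix is found by direct index lookup.
-- Objective: alternative (same O(n) cost, different algorithm).


-- ===== PORT A =====
-- the inner 'while r < n and full == 3: …' loop; state (counter, r)
def innerA (cs : List Char) (k full : Int) (counter : PySem.Dict Char Int) (r : Int) : PySem.Dict Char Int × Int :=
  if h : r < (cs.length : Int) ∧ full = 3 then
    if counter.getD (PySem.List.pyGetD cs r ' ') 0 > k then
      innerA cs k full (counter.modify (PySem.List.pyGetD cs r ' ') 0 (· - 1)) (r + 1)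
    else (counter, r)
  else (counter, r)
termination_by ((cs.length : Int) - r).toNat
decreasing_by omega

def takeCharacters (s : String) (k : Int) : Int :=
  let cs := s.toList
  let n : Int := cs.length
  let counter := (PySem.List.pyRange 0 n 1).foldl
      (fun d i => d.modify (PySem.List.pyGetD cs i ' ') 0 (· + 1))
      (PySem.Dict.ofList [('a', 0), ('b', 0), ('c', 0)])
  if counter.items.any (fun p => p.2 < k) then -1   -- 'for key, v in counter.items(): if v < k: return -1'
  else
    let full : Int := 3
    let st := (PySem.List.pyRange 0 n 1).foldl
      (fun (st : PySem.Dict Char Int × Int × Int) l =>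
        let inner := innerA cs k full st.1 st.2.1
        let result := min st.2.2 (l + n - inner.2)
        (inner.1.modify (PySem.List.pyGetD cs l ' ') 0 (· + 1), inner.2, result))
      (counter, 0, n)
    st.2.2

-- ===== PORT B =====
def takeCharacters_alt (s : String) (k : Int) : Int :=
  let cs := s.toList
  let n : Int := cs.length
  -- s.count('a') with a one-character needle is exactly the character count (exact)
  if (cs.count 'a' : Int) < k ∨ (cs.count 'b' : Int) < k ∨ (cs.count 'c' : Int) < k then -1
  else
    let pos := (PySem.List.enumerate cs 0).foldl
      (fun (d : PySem.Dict Char (List Int)) p =>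
        if d.contains p.2 then d.modify p.2 [] (· ++ [p.1]) else d)
      (PySem.Dict.ofList [('a', []), ('b', []), ('c', [])])
    let st := (PySem.List.pyRange 0 (n + 1) 1).foldl
      (fun (st : Int × PySem.Dict Char Int) i =>
        let j := ("abc".toList).foldl
          (fun j ch =>
            let need := k - st.2.getD ch 0
            if need > 0 then
              let ps := pos.getD ch []
              max j (n - PySem.List.pyGetD ps ((ps.length : Int) - need) 0)
            else j) 0
        let best := if i + j ≤ n then min st.1 (i + j) else st.1
        let cnt := if i < n ∧ st.2.contains (PySem.List.pyGetD cs i ' ')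
                   then st.2.modify (PySem.List.pyGetD cs i ' ') 0 (· + 1) else st.2
        (best, cnt))
      (n, PySem.Dict.ofList [('a', 0), ('b', 0), ('c', 0)])
    st.1

-- ===== PRECONDITION & SPEC =====
-- Pre_ excludes exactly the strings containing a character other than 'a','b','c': A's counting
-- loop raises KeyError on them (see Raises_ below); A returns normally on every other input.
def Pre_takeCharacters (s : String) (k : Int) : Prop := s.toList.all (fun c => c == 'a' || c == 'b' || c == 'c') = true
instance (s : String) (k : Int) : Decidable (Pre_takeCharacters s k) := by unfold Pre_takeCharacters; infer_instance
def pvWitness_takeCharacters : String × Int := ("abacbc", 2)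

-- On strings containing any character other than 'a','b','c' A raises KeyError in its counting loop;
-- B treats such characters as deletable filler and returns the minimum number of end-deletions.
def Raises_takeCharacters (s : String) (k : Int) : Prop := s.toList.any (fun c => !(c == 'a' || c == 'b' || c == 'c')) = true
instance (s : String) (k : Int) : Decidable (Raises_takeCharacters s k) := by unfold Raises_takeCharacters; infer_instance
def pvRaiseWitness_takeCharacters : String × Int := ("axbc", 1)
def pvRaiseWitnessOut_takeCharacters : Int := 3

def Spec_takeCharacters (s : String) (k : Int) (out : Int) : Prop := out = takeCharacters_alt s k
instance (s : String) (k : Int) (out : Int) : Decidable (Spec_takeCharacters s k out) := by unfold Spec_takeCharacters; infer_instance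

-- ===== CLAIM (what is proved, stated in full; the proofs are below) =====
def Claim_equal_takeCharacters : Prop := ∀ (s : String) (k : Int), Dom_takeCharacters s k → Pre_takeCharacters s k → Spec_takeCharacters s k (takeCharacters s k)
def Claim_raises_takeCharacters : Prop := (∀ (s : String) (k : Int), Dom_takeCharacters s k → Raises_takeCharacters s k → ¬ Pre_takeCharacters s k) ∧ (Dom_takeCharacters (pvRaiseWitness_takeCharacters.1) (pvRaiseWitness_takeCharacters.2) ∧ Raises_takeCharacters (pvRaiseWitness_takeCharacters.1) (pvRaiseWitness_takeCharacters.2) ∧ takeCharacters_alt (pvRaiseWitness_takeCharacters.1) (pvRaiseWitness_takeCharacters.2) = pvRaiseWitnessOut_takeCharacters)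

-- ===== LEMMAS AND PROOFS =====

-- ---------- proof-only helpers ----------
-- a literal three-key dict {'a': x, 'b': y, 'c': z}
def pvC3 (x y z : Int) : PySem.Dict Char Int := PySem.Dict.mk [('a', x), ('b', y), ('c', z)]
def pvP3 (x y z : List Int) : PySem.Dict Char (List Int) := PySem.Dict.mk [('a', x), ('b', y), ('c', z)]

-- "the window cs[l:m] may be removed": every character keeps at least k occurrences
def pvVb (cs : List Char) (k : Int) (l m : Nat) : Bool :=
  cs.all fun ch => decide (((cs.take m).count ch : Int) ≤ ((cs.take l).count ch : Int) + (cs.count ch : Int) - k)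

-- the largest m ≤ |cs| whose window cs[l:m] may be removed
def pvRho (cs : List Char) (k : Int) (l : Nat) : Nat :=
  Nat.findGreatest (fun m => pvVb cs k l m = true) cs.length

-- ---------- counting facts ----------
lemma pv_count_take_le (cs : List Char) (m : Nat) (ch : Char) :
    (cs.take m).count ch ≤ cs.count ch :=
  (List.take_sublist m cs).count_le ch

lemma pv_count_take_mono (cs : List Char) {m m' : Nat} (h : m ≤ m') (ch : Char) :
    (cs.take m).count ch ≤ (cs.take m').count ch := by
  have hh : cs.take m = (cs.take m').take m := by
    rw [List.take_take, Nat.min_eq_left h]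
  rw [hh]; exact (List.take_sublist _ _).count_le ch

lemma pv_count_take_succ (cs : List Char) {m : Nat} (h : m < cs.length) (ch : Char) :
    (cs.take (m + 1)).count ch = (cs.take m).count ch + (if ch = cs[m] then 1 else 0) := by
  rw [List.take_add_one, List.getElem?_eq_getElem h]
  rw [List.count_append]
  congr 1
  show List.count ch [cs[m]] = _
  rcases eq_or_ne ch cs[m] with hc | hc
  · simp [hc, List.count_singleton']
  · simp [hc, List.count_singleton', Ne.symm hc]

lemma pv_count_take_of_le (cs : List Char) {m : Nat} (h : cs.length ≤ m) (ch : Char) :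
    (cs.take m).count ch = cs.count ch := by
  rw [List.take_of_length_le h]

-- ---------- pvVb facts ----------
lemma pvVb_iff (cs : List Char) (k : Int) (l m : Nat) :
    pvVb cs k l m = true ↔
      ∀ ch ∈ cs, ((cs.take m).count ch : Int) ≤ ((cs.take l).count ch : Int) + (cs.count ch : Int) - k := by
  simp [pvVb]

lemma pvVb_antitone (cs : List Char) (k : Int) {l m m' : Nat} (h : m ≤ m')
    (hv : pvVb cs k l m' = true) : pvVb cs k l m = true := by
  rw [pvVb_iff] at hv ⊢
  intro ch hch
  have := pv_count_take_mono cs h ch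
  have := hv ch hch
  omega

lemma pvVb_of_le (cs : List Char) (k : Int) {l m : Nat}
    (hcnt : ∀ ch ∈ cs, k ≤ (cs.count ch : Int)) (h : m ≤ l) : pvVb cs k l m = true := by
  rw [pvVb_iff]
  intro ch hch
  have h1 := pv_count_take_mono cs h ch
  have h2 := hcnt ch hch
  omega

lemma pvVb_mono_l (cs : List Char) (k : Int) {l l' m : Nat} (h : l ≤ l')
    (hv : pvVb cs k l m = true) : pvVb cs k l' m = true := by
  rw [pvVb_iff] at hv ⊢
  intro ch hch
  have := pv_count_take_mono cs h ch
  have := hv ch hch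
  omega

-- ---------- pvRho facts ----------
lemma pvRho_le (cs : List Char) (k : Int) (l : Nat) : pvRho cs k l ≤ cs.length :=
  Nat.findGreatest_le _

lemma pv_le_rho (cs : List Char) (k : Int) {l m : Nat} (hm : m ≤ cs.length)
    (h : pvVb cs k l m = true) : m ≤ pvRho cs k l :=
  Nat.le_findGreatest hm h

lemma pvVb_rho (cs : List Char) (k : Int) (l : Nat)
    (hcnt : ∀ ch ∈ cs, k ≤ (cs.count ch : Int)) : pvVb cs k l (pvRho cs k l) = true := by
  have h0 : pvVb cs k l 0 = true := by
    rw [pvVb_iff]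
    intro ch hch
    have := hcnt ch hch
    simp
    omega
  unfold pvRho
  exact Nat.findGreatest_spec (P := fun m => pvVb cs k l m = true) (Nat.zero_le _) h0

lemma pv_l_le_rho (cs : List Char) (k : Int) {l : Nat} (hl : l ≤ cs.length)
    (hcnt : ∀ ch ∈ cs, k ≤ (cs.count ch : Int)) : l ≤ pvRho cs k l :=
  pv_le_rho cs k hl (pvVb_of_le cs k hcnt le_rfl)

lemma pvRho_length (cs : List Char) (k : Int)
    (hcnt : ∀ ch ∈ cs, k ≤ (cs.count ch : Int)) : pvRho cs k cs.length = cs.length :=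
  le_antisymm (pvRho_le cs k _) (pv_l_le_rho cs k le_rfl hcnt)

-- ---------- dict-literal evaluation ----------
lemma pvC3_getD_a (x y z v : Int) : (pvC3 x y z).getD 'a' v = x := by
  simp [pvC3, PySem.Dict.getD, PySem.Dict.get?]
lemma pvC3_getD_b (x y z v : Int) : (pvC3 x y z).getD 'b' v = y := by
  simp [pvC3, PySem.Dict.getD, PySem.Dict.get?]
lemma pvC3_getD_c (x y z v : Int) : (pvC3 x y z).getD 'c' v = z := by
  simp [pvC3, PySem.Dict.getD, PySem.Dict.get?]
lemma pvC3_modify_a (x y z : Int) (g : Int → Int) :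
    (pvC3 x y z).modify 'a' 0 g = pvC3 (g x) y z := by
  simp [pvC3, PySem.Dict.modify, PySem.Dict.getD, PySem.Dict.get?, PySem.Dict.insert, PySem.Dict.contains]
lemma pvC3_modify_b (x y z : Int) (g : Int → Int) :
    (pvC3 x y z).modify 'b' 0 g = pvC3 x (g y) z := by
  simp [pvC3, PySem.Dict.modify, PySem.Dict.getD, PySem.Dict.get?, PySem.Dict.insert, PySem.Dict.contains]
lemma pvC3_modify_c (x y z : Int) (g : Int → Int) :
    (pvC3 x y z).modify 'c' 0 g = pvC3 x y (g z) := by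
  simp [pvC3, PySem.Dict.modify, PySem.Dict.getD, PySem.Dict.get?, PySem.Dict.insert, PySem.Dict.contains]
lemma pvC3_contains (x y z : Int) (ch : Char) :
    (pvC3 x y z).contains ch = ('a' == ch || ('b' == ch || 'c' == ch)) := by
  simp [pvC3, PySem.Dict.contains]
lemma pvC3_items (x y z : Int) : (pvC3 x y z).items = [('a', x), ('b', y), ('c', z)] := rfl

lemma pvP3_getD_a (x y z v : List Int) : (pvP3 x y z).getD 'a' v = x := by
  simp [pvP3, PySem.Dict.getD, PySem.Dict.get?]
lemma pvP3_getD_b (x y z v : List Int) : (pvP3 x y z).getD 'b' v = y := by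
  simp [pvP3, PySem.Dict.getD, PySem.Dict.get?]
lemma pvP3_getD_c (x y z v : List Int) : (pvP3 x y z).getD 'c' v = z := by
  simp [pvP3, PySem.Dict.getD, PySem.Dict.get?]
lemma pvP3_modify_a (x y z : List Int) (g : List Int → List Int) :
    (pvP3 x y z).modify 'a' [] g = pvP3 (g x) y z := by
  simp [pvP3, PySem.Dict.modify, PySem.Dict.getD, PySem.Dict.get?, PySem.Dict.insert, PySem.Dict.contains]
lemma pvP3_modify_b (x y z : List Int) (g : List Int → List Int) :
    (pvP3 x y z).modify 'b' [] g = pvP3 x (g y) z := by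
  simp [pvP3, PySem.Dict.modify, PySem.Dict.getD, PySem.Dict.get?, PySem.Dict.insert, PySem.Dict.contains]
lemma pvP3_modify_c (x y z : List Int) (g : List Int → List Int) :
    (pvP3 x y z).modify 'c' [] g = pvP3 x y (g z) := by
  simp [pvP3, PySem.Dict.modify, PySem.Dict.getD, PySem.Dict.get?, PySem.Dict.insert, PySem.Dict.contains]
lemma pvP3_contains (x y z : List Int) (ch : Char) :
    (pvP3 x y z).contains ch = ('a' == ch || ('b' == ch || 'c' == ch)) := by
  simp [pvP3, PySem.Dict.contains]

-- ---------- A's counting loop ----------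
lemma pvCountLoop (l : List Char) (hp : ∀ c ∈ l, c = 'a' ∨ c = 'b' ∨ c = 'c') (x y z : Int) :
    l.foldl (fun d c => d.modify c 0 (· + 1)) (pvC3 x y z)
      = pvC3 (x + l.count 'a') (y + l.count 'b') (z + l.count 'c') := by
  induction l generalizing x y z with
  | nil => simp
  | cons c t ih =>
    have hpt : ∀ c ∈ t, c = 'a' ∨ c = 'b' ∨ c = 'c' := fun c hc => hp c (List.mem_cons_of_mem _ hc)
    rcases hp c (List.mem_cons_self) with h | h | h <;> subst h <;>
      simp only [List.foldl_cons, pvC3_modify_a, pvC3_modify_b, pvC3_modify_c, ih hpt,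
        List.count_cons] <;>
      simp [pvC3] <;> omega

-- ---------- B's position-list loop ----------
lemma pvPosLoop (l : List (Int × Char)) (x y z : List Int) :
    l.foldl (fun d p => if d.contains p.2 then d.modify p.2 [] (· ++ [p.1]) else d) (pvP3 x y z)
      = pvP3 (x ++ (l.filter (fun p => p.2 == 'a')).map (·.1))
             (y ++ (l.filter (fun p => p.2 == 'b')).map (·.1))
             (z ++ (l.filter (fun p => p.2 == 'c')).map (·.1)) := by
  induction l generalizing x y z with
  | nil => simp
  | cons p t ih =>
    by_cases ha : p.2 = 'a'
    · simp only [List.foldl_cons, pvP3_contains, ha, List.filter_cons]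
      simp [pvP3_modify_a, ih]
    · by_cases hb : p.2 = 'b'
      · simp only [List.foldl_cons, pvP3_contains, hb, List.filter_cons]
        simp [pvP3_modify_b, ih]
      · by_cases hc : p.2 = 'c'
        · simp only [List.foldl_cons, pvP3_contains, hc, List.filter_cons]
          simp [pvP3_modify_c, ih]
        · have : (pvP3 x y z).contains p.2 = false := by
            rw [pvP3_contains]
            simp [Ne.symm ha, Ne.symm hb, Ne.symm hc]
          simp only [List.foldl_cons, this, Bool.false_eq_true, if_false, List.filter_cons]
          have fa : (p.2 == 'a') = false := by simp [ha]
          have fb : (p.2 == 'b') = false := by simp [hb]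
          have fc : (p.2 == 'c') = false := by simp [hc]
          rw [fa, fb, fc]
          simp [ih]

-- ---------- occurrence positions ----------
def pvOcc (cs : List Char) (ch : Char) : List Int :=
  ((PySem.List.enumerate cs 0).filter (fun p => p.2 == ch)).map (·.1)

lemma pvOcc_aux (cs : List Char) (ch : Char) : ∀ s : Int,
    (((PySem.List.enumerate cs s).filter (fun p => p.2 == ch)).map (·.1)).length = cs.count ch ∧
    ∀ t : Nat, t < cs.count ch →
      ∃ q : Nat, q < cs.length ∧
        (((PySem.List.enumerate cs s).filter (fun p => p.2 == ch)).map (·.1))[t]? = some (s + q) ∧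
        (cs.take q).count ch = t ∧ cs[q]? = some ch := by
  induction cs with
  | nil =>
    intro s
    refine ⟨by simp [PySem.List.enumerate], ?_⟩
    intro t ht
    simp at ht
  | cons c rest ih =>
    intro s
    have hcons : PySem.List.enumerate (c :: rest) s = (s, c) :: PySem.List.enumerate rest (s + 1) := by
      simp [PySem.List.enumerate]
    obtain ⟨ihlen, ihget⟩ := ih (s + 1)
    by_cases hc : c = ch
    · refine ⟨?_, ?_⟩
      · rw [hcons]
        simp only [List.filter_cons]
        simp [hc, ihlen, List.count_cons]
      · intro t ht
        rw [hcons]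
        match t with
        | 0 =>
          refine ⟨0, by simp, ?_, by simp, by simp [hc]⟩
          simp [List.filter_cons, hc]
        | (t' + 1) =>
          have ht' : t' < rest.count ch := by
            rw [List.count_cons] at ht
            simp [hc] at ht
            omega
          obtain ⟨q, hq, hget, hcnt, hch⟩ := ihget t' ht'
          refine ⟨q + 1, by simpa using Nat.succ_lt_succ hq, ?_, ?_, by simpa using hch⟩
          · simp only [List.filter_cons]
            simp only [hc, beq_self_eq_true, if_pos]
            rw [List.map_cons, List.getElem?_cons_succ]
            rw [hget]
            congr 1
            push_cast
            ring
          · rw [List.take_succ_cons, List.count_cons]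
            simp [hc, hcnt]
    · refine ⟨?_, ?_⟩
      · rw [hcons]
        simp only [List.filter_cons]
        simp [hc, ihlen, List.count_cons, Ne.symm hc]
      · intro t ht
        have ht' : t < rest.count ch := by
          rw [List.count_cons] at ht
          simpa [hc] using ht
        obtain ⟨q, hq, hget, hcnt, hch⟩ := ihget t ht'
        rw [hcons]
        refine ⟨q + 1, by simpa using Nat.succ_lt_succ hq, ?_, ?_, by simpa using hch⟩
        · simp only [List.filter_cons]
          have : ((s, c).2 == ch) = false := by simpa using hc
          rw [this]
          simp only [Bool.false_eq_true, if_false]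
          rw [hget]
          congr 1
          push_cast
          ring
        · rw [List.take_succ_cons, List.count_cons]
          simp [hc, hcnt]

lemma pvOcc_length (cs : List Char) (ch : Char) : (pvOcc cs ch).length = cs.count ch := by
  unfold pvOcc
  exact (pvOcc_aux cs ch 0).1

lemma pvOcc_get (cs : List Char) (ch : Char) {t : Nat} (h : t < cs.count ch) :
    ∃ q : Nat, q < cs.length ∧ (pvOcc cs ch)[t]? = some (q : Int) ∧
      (cs.take q).count ch = t ∧ cs[q]? = some ch := by
  obtain ⟨q, hq, hget, hcnt, hch⟩ := (pvOcc_aux cs ch 0).2 t h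
  rw [show ((0 : Int) + q) = (q : Int) by ring] at hget
  exact ⟨q, hq, hget, hcnt, hch⟩

-- ---------- generic bounded-max fold ----------
lemma pvFoldMaxIf_ge_init {α : Type} (l : List α) (p : α → Prop) [DecidablePred p]
    (f : α → Int) : ∀ init : Int,
    init ≤ l.foldl (fun j x => if p x then max j (f x) else j) init := by
  induction l with
  | nil => intro init; simp
  | cons c t ih =>
    intro init
    simp only [List.foldl_cons]
    split_ifs
    · exact le_trans (le_max_left _ _) (ih _)
    · exact ih _

lemma pvFoldMaxIf_ge_mem {α : Type} (l : List α) (p : α → Prop) [DecidablePred p]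
    (f : α → Int) (x : α) : ∀ init : Int, x ∈ l → p x →
    f x ≤ l.foldl (fun j y => if p y then max j (f y) else j) init := by
  induction l with
  | nil => intro init hx; cases hx
  | cons c t ih =>
    intro init hx hp
    simp only [List.foldl_cons]
    rcases List.mem_cons.1 hx with h | h
    · subst h
      rw [if_pos hp]
      exact le_trans (le_max_right _ _) (pvFoldMaxIf_ge_init t p f _)
    · split_ifs <;> exact ih _ h hp

lemma pvFoldMaxIf_le {α : Type} (l : List α) (p : α → Prop) [DecidablePred p]
    (f : α → Int) (B : Int) : ∀ init : Int, init ≤ B → (∀ x ∈ l, p x → f x ≤ B) →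
    l.foldl (fun j x => if p x then max j (f x) else j) init ≤ B := by
  induction l with
  | nil => intro init h0 _; simpa
  | cons c t ih =>
    intro init h0 h
    simp only [List.foldl_cons]
    split_ifs with hc
    · exact ih _ (max_le h0 (h c List.mem_cons_self hc))
        (fun x hx hp => h x (List.mem_cons_of_mem _ hx) hp)
    · exact ih _ h0 (fun x hx hp => h x (List.mem_cons_of_mem _ hx) hp)

-- ---------- a min-fold never exceeds its start ----------
lemma pvFoldMin_le_init {α : Type} (l : List α) (f : α → Int) (init : Int) :
    l.foldl (fun acc m => min acc (f m)) init ≤ init := by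
  induction l generalizing init with
  | nil => simp
  | cons c t ih => exact le_trans (ih _) (min_le_left _ _)


-- counter entries maintained by A's window: total - count(cs[:r]) + count(cs[:l])
def pvW (cs : List Char) (l r : Nat) (ch : Char) : Int :=
  (cs.count ch : Int) - ((cs.take r).count ch : Int) + ((cs.take l).count ch : Int)

lemma pvInnerA (cs : List Char) (k : Int)
    (hpre : ∀ c ∈ cs, c = 'a' ∨ c = 'b' ∨ c = 'c')
    (hcnt : ∀ ch ∈ cs, k ≤ (cs.count ch : Int)) (l : Nat) :
    ∀ fuel r : Nat, cs.length - r ≤ fuel → r ≤ cs.length → pvVb cs k l r = true →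
    innerA cs k 3 (pvC3 (pvW cs l r 'a') (pvW cs l r 'b') (pvW cs l r 'c')) (r : Int)
      = (pvC3 (pvW cs l (pvRho cs k l) 'a') (pvW cs l (pvRho cs k l) 'b')
          (pvW cs l (pvRho cs k l) 'c'), ((pvRho cs k l : Nat) : Int)) := by
  intro fuel
  induction fuel with
  | zero =>
    intro r hfuel hr hV
    have hrn : r = cs.length := by omega
    have hrho : pvRho cs k l = cs.length := by
      have h1 := pvRho_le cs k l
      have h2 := pv_le_rho cs k (m := cs.length) le_rfl (hrn ▸ hV)
      omega
    rw [innerA]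
    rw [dif_neg (by simp [hrn])]
    rw [hrn, hrho]
  | succ fuel ih =>
    intro r hfuel hr hV
    by_cases hrn : r < cs.length
    · have hmem : cs[r] ∈ cs := List.getElem_mem hrn
      have hget : PySem.List.pyGetD cs (r : Int) ' ' = cs[r] := by
        rw [PySem.List.pyGetD_natCast]
        exact List.getD_eq_getElem cs ' ' hrn
      rw [innerA]
      rw [dif_pos ⟨by exact_mod_cast hrn, rfl⟩]
      rw [hget]
      have hVnextgen : pvW cs l r cs[r] > k → pvVb cs k l (r + 1) = true := by
        intro hgt
        rw [pvVb_iff]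
        intro ch' hch'
        have hsucc := pv_count_take_succ cs hrn ch'
        have hVr := (pvVb_iff cs k l r).1 hV ch' hch'
        by_cases hx : ch' = cs[r]
        · subst hx
          rw [if_pos rfl] at hsucc
          unfold pvW at hgt
          omega
        · rw [if_neg hx] at hsucc
          omega
      have hrhogen : ¬(pvW cs l r cs[r] > k) → pvRho cs k l = r := by
        intro hgt
        have h2 := pv_le_rho cs k hr hV
        by_contra hne
        have hlt : r < pvRho cs k l := by omega
        have hVr1 : pvVb cs k l (r + 1) = true :=
          pvVb_antitone cs k (by omega) (pvVb_rho cs k l hcnt)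
        have hle := (pvVb_iff cs k l (r + 1)).1 hVr1 cs[r] hmem
        have hsucc := pv_count_take_succ cs hrn cs[r]
        rw [if_pos rfl] at hsucc
        unfold pvW at hgt
        omega
      have hrw : ∀ ch' : Char, ch' = cs[r] → pvW cs l r ch' - 1 = pvW cs l (r + 1) ch' := by
        intro ch' hx
        unfold pvW
        have hsucc := pv_count_take_succ cs hrn ch'
        rw [if_pos hx] at hsucc
        rw [hsucc]
        push_cast
        ring
      have hrw2 : ∀ ch' : Char, ch' ≠ cs[r] → pvW cs l r ch' = pvW cs l (r + 1) ch' := by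
        intro ch' hx
        unfold pvW
        have hsucc := pv_count_take_succ cs hrn ch'
        rw [if_neg hx] at hsucc
        rw [hsucc]
        simp
      rcases hpre cs[r] hmem with hch | hch | hch
      · rw [hch, pvC3_getD_a]
        by_cases hgt : pvW cs l r 'a' > k
        · rw [if_pos hgt, pvC3_modify_a]
          have hVnext := hVnextgen (by rw [hch]; exact hgt)
          have := ih (r + 1) (by omega) (by omega) hVnext
          rw [show ((r : Int) + 1) = ((r + 1 : Nat) : Int) by push_cast; ring]
          rw [← this]
          congr 1
          rw [hrw 'a' (by rw [hch]), hrw2 'b' (by rw [hch]; decide),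
              hrw2 'c' (by rw [hch]; decide)]
        · rw [if_neg hgt, hrhogen (by rw [hch]; exact hgt)]
      · rw [hch, pvC3_getD_b]
        by_cases hgt : pvW cs l r 'b' > k
        · rw [if_pos hgt, pvC3_modify_b]
          have hVnext := hVnextgen (by rw [hch]; exact hgt)
          have := ih (r + 1) (by omega) (by omega) hVnext
          rw [show ((r : Int) + 1) = ((r + 1 : Nat) : Int) by push_cast; ring]
          rw [← this]
          congr 1
          rw [hrw 'b' (by rw [hch]), hrw2 'a' (by rw [hch]; decide),
              hrw2 'c' (by rw [hch]; decide)]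
        · rw [if_neg hgt, hrhogen (by rw [hch]; exact hgt)]
      · rw [hch, pvC3_getD_c]
        by_cases hgt : pvW cs l r 'c' > k
        · rw [if_pos hgt, pvC3_modify_c]
          have hVnext := hVnextgen (by rw [hch]; exact hgt)
          have := ih (r + 1) (by omega) (by omega) hVnext
          rw [show ((r : Int) + 1) = ((r + 1 : Nat) : Int) by push_cast; ring]
          rw [← this]
          congr 1
          rw [hrw 'c' (by rw [hch]), hrw2 'a' (by rw [hch]; decide),
              hrw2 'b' (by rw [hch]; decide)]
        · rw [if_neg hgt, hrhogen (by rw [hch]; exact hgt)]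
    · have hrn' : r = cs.length := by omega
      have hrho : pvRho cs k l = cs.length := by
        have h1 := pvRho_le cs k l
        have h2 := pv_le_rho cs k (m := cs.length) le_rfl (hrn' ▸ hV)
        omega
      rw [innerA]
      rw [dif_neg (by simp [hrn'])]
      rw [hrn', hrho]


lemma pvOuterA (cs : List Char) (k : Int)
    (hpre : ∀ c ∈ cs, c = 'a' ∨ c = 'b' ∨ c = 'c')
    (hcnt : ∀ ch ∈ cs, k ≤ (cs.count ch : Int)) :
    ∀ (d l r : Nat) (res : Int), l + d = cs.length → r ≤ cs.length → pvVb cs k l r = true →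
    ((PySem.List.pyRange (l : Int) (cs.length : Int) 1).foldl
        (fun (st : PySem.Dict Char Int × Int × Int) x =>
          let inner := innerA cs k 3 st.1 st.2.1
          let result := min st.2.2 (x + (cs.length : Int) - inner.2)
          (inner.1.modify (PySem.List.pyGetD cs x ' ') 0 (· + 1), inner.2, result))
        (pvC3 (pvW cs l r 'a') (pvW cs l r 'b') (pvW cs l r 'c'), (r : Int), res)).2.2
      = (List.range' l d).foldl
          (fun (acc : Int) (m : Nat) => min acc ((m : Int) + (cs.length : Int) - (pvRho cs k m : Int))) res := by
  intro d
  induction d with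
  | zero =>
    intro l r res hl hr hV
    rw [PySem.List.pyRange_one_eq_nil (by push_cast; omega)]
    simp [List.range']
  | succ d ihd =>
    intro l r res hl hr hV
    have hln : l < cs.length := by omega
    rw [PySem.List.pyRange_one_cons (by exact_mod_cast hln)]
    rw [List.foldl_cons]
    dsimp only
    rw [pvInnerA cs k hpre hcnt l cs.length r (by omega) hr hV]
    dsimp only
    have hget : PySem.List.pyGetD cs (l : Int) ' ' = cs[l] := by
      rw [PySem.List.pyGetD_natCast]
      exact List.getD_eq_getElem cs ' ' hln
    rw [hget]
    have hrho_le := pvRho_le cs k l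
    have hVnext : pvVb cs k (l + 1) (pvRho cs k l) = true :=
      pvVb_mono_l cs k (by omega) (pvVb_rho cs k l hcnt)
    have hrw : ∀ ch' : Char, ch' = cs[l] →
        pvW cs l (pvRho cs k l) ch' + 1 = pvW cs (l + 1) (pvRho cs k l) ch' := by
      intro ch' hx
      unfold pvW
      have hsucc := pv_count_take_succ cs hln ch'
      rw [if_pos hx] at hsucc
      rw [hsucc]
      push_cast
      ring
    have hrw2 : ∀ ch' : Char, ch' ≠ cs[l] →
        pvW cs l (pvRho cs k l) ch' = pvW cs (l + 1) (pvRho cs k l) ch' := by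
      intro ch' hx
      unfold pvW
      have hsucc := pv_count_take_succ cs hln ch'
      rw [if_neg hx] at hsucc
      rw [hsucc]
      simp
    have hmem : cs[l] ∈ cs := List.getElem_mem hln
    have hstep : ((pvC3 (pvW cs l (pvRho cs k l) 'a') (pvW cs l (pvRho cs k l) 'b')
          (pvW cs l (pvRho cs k l) 'c')).modify cs[l] 0 (· + 1))
        = pvC3 (pvW cs (l + 1) (pvRho cs k l) 'a') (pvW cs (l + 1) (pvRho cs k l) 'b')
            (pvW cs (l + 1) (pvRho cs k l) 'c') := by
      rcases hpre cs[l] hmem with hch | hch | hch <;> rw [hch]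
      · rw [pvC3_modify_a, hrw 'a' hch.symm, hrw2 'b' (by rw [hch]; decide),
          hrw2 'c' (by rw [hch]; decide)]
      · rw [pvC3_modify_b, hrw 'b' hch.symm, hrw2 'a' (by rw [hch]; decide),
          hrw2 'c' (by rw [hch]; decide)]
      · rw [pvC3_modify_c, hrw 'c' hch.symm, hrw2 'a' (by rw [hch]; decide),
          hrw2 'b' (by rw [hch]; decide)]
    rw [hstep]
    rw [show ((l : Int) + 1) = ((l + 1 : Nat) : Int) by push_cast; ring]
    rw [ihd (l + 1) (pvRho cs k l) _ (by omega) hrho_le hVnext]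
    rw [List.range'_succ]
    rw [List.foldl_cons]


def pvCnt3 (cs : List Char) (i : Nat) : PySem.Dict Char Int :=
  pvC3 ((cs.take i).count 'a' : Int) ((cs.take i).count 'b' : Int) ((cs.take i).count 'c' : Int)
def pvPos3 (cs : List Char) : PySem.Dict Char (List Int) :=
  pvP3 (pvOcc cs 'a') (pvOcc cs 'b') (pvOcc cs 'c')

lemma pvCnt3_getD_a (cs : List Char) (i : Nat) :
    (pvCnt3 cs i).getD 'a' 0 = ((cs.take i).count 'a' : Int) := pvC3_getD_a _ _ _ _
lemma pvCnt3_getD_b (cs : List Char) (i : Nat) :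
    (pvCnt3 cs i).getD 'b' 0 = ((cs.take i).count 'b' : Int) := pvC3_getD_b _ _ _ _
lemma pvCnt3_getD_c (cs : List Char) (i : Nat) :
    (pvCnt3 cs i).getD 'c' 0 = ((cs.take i).count 'c' : Int) := pvC3_getD_c _ _ _ _
lemma pvPos3_getD_a (cs : List Char) : (pvPos3 cs).getD 'a' [] = pvOcc cs 'a' := pvP3_getD_a _ _ _ _
lemma pvPos3_getD_b (cs : List Char) : (pvPos3 cs).getD 'b' [] = pvOcc cs 'b' := pvP3_getD_b _ _ _ _
lemma pvPos3_getD_c (cs : List Char) : (pvPos3 cs).getD 'c' [] = pvOcc cs 'c' := pvP3_getD_c _ _ _ _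

-- the index lookup B performs for a character still missing `need` occurrences
lemma pvCharQ (cs : List Char) (k : Int) (ch : Char) (i : Nat)
    (hk : k ≤ (cs.count ch : Int)) (hneed : 0 < k - ((cs.take i).count ch : Int)) :
    ∃ q : Nat, q < cs.length ∧
      PySem.List.pyGetD (pvOcc cs ch)
          (((pvOcc cs ch).length : Int) - (k - ((cs.take i).count ch : Int))) 0 = (q : Int) ∧
      ((cs.take q).count ch : Int) = ((cs.take i).count ch : Int) + (cs.count ch : Int) - k ∧
      cs[q]? = some ch := by
  have hp0 : (0 : Int) ≤ ((cs.take i).count ch : Int) := by positivity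
  have htnn : (0 : Int) ≤ (cs.count ch : Int) - (k - ((cs.take i).count ch : Int)) := by omega
  set t : Nat := ((cs.count ch : Int) - (k - ((cs.take i).count ch : Int))).toNat with hts
  have ht : (t : Int) = (cs.count ch : Int) - (k - ((cs.take i).count ch : Int)) := by
    rw [hts, Int.toNat_of_nonneg htnn]
  have htlt : t < cs.count ch := by omega
  obtain ⟨q, hq, hget, hcntq, hch⟩ := pvOcc_get cs ch htlt
  refine ⟨q, hq, ?_, ?_, hch⟩
  · rw [pvOcc_length]
    rw [show ((cs.count ch : Int) - (k - ((cs.take i).count ch : Int))) = (t : Int) from ht.symm]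
    rw [PySem.List.pyGetD_natCast, List.getD_eq_getElem?_getD, hget]
    rfl
  · rw [hcntq]
    omega

-- combining the three per-character lookups: B's j equals n - pvRho
lemma pvJeq (cs : List Char) (k : Int)
    (hpre : ∀ c ∈ cs, c = 'a' ∨ c = 'b' ∨ c = 'c')
    (hca : k ≤ (cs.count 'a' : Int)) (hcb : k ≤ (cs.count 'b' : Int))
    (hcc : k ≤ (cs.count 'c' : Int)) (i : Nat) (hi : i ≤ cs.length) :
    (['a', 'b', 'c'] : List Char).foldl
      (fun j ch => if 0 < k - (pvCnt3 cs i).getD ch 0 then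
          max j ((cs.length : Int) - PySem.List.pyGetD ((pvPos3 cs).getD ch [])
            ((((pvPos3 cs).getD ch []).length : Int) - (k - (pvCnt3 cs i).getD ch 0)) 0)
        else j) 0
      = (cs.length : Int) - (pvRho cs k i : Int) := by
  have hcnt : ∀ ch ∈ cs, k ≤ (cs.count ch : Int) := by
    intro ch hch
    rcases hpre ch hch with h | h | h <;> subst h <;> assumption
  have hkof : ∀ ch : Char, ch = 'a' ∨ ch = 'b' ∨ ch = 'c' → k ≤ (cs.count ch : Int) := by
    intro ch h
    rcases h with h | h | h <;> subst h <;> assumption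
  -- the maximality fact: pvRho never passes an occurrence B's lookup points at
  have hrho_le_q : ∀ (ch : Char) (q : Nat), q < cs.length → cs[q]? = some ch →
      ((cs.take q).count ch : Int) = ((cs.take i).count ch : Int) + (cs.count ch : Int) - k →
      pvRho cs k i ≤ q := by
    intro ch q hq hchq hcap
    by_contra hlt
    have h1 : q + 1 ≤ pvRho cs k i := by omega
    have hV1 : pvVb cs k i (q + 1) = true :=
      pvVb_antitone cs k h1 (pvVb_rho cs k i hcnt)
    have hchq' : cs[q] = ch := by
      have := List.getElem?_eq_getElem hq (l := cs)
      rw [this] at hchq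
      exact Option.some.inj hchq
    have hmem : ch ∈ cs := by
      rw [← hchq']
      exact List.getElem_mem hq
    have hle := (pvVb_iff cs k i (q + 1)).1 hV1 ch hmem
    have hsucc := pv_count_take_succ cs hq ch
    rw [if_pos hchq'.symm] at hsucc
    omega
  set p : Char → Prop := fun ch => 0 < k - (pvCnt3 cs i).getD ch 0 with hp
  set f : Char → Int := fun ch => (cs.length : Int) - PySem.List.pyGetD ((pvPos3 cs).getD ch [])
      ((((pvPos3 cs).getD ch []).length : Int) - (k - (pvCnt3 cs i).getD ch 0)) 0 with hf
  have hrho_le_n := pvRho_le cs k i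
  -- per concrete character: the f-value is n - q with the pvCharQ facts
  have hchar : ∀ ch : Char, ch = 'a' ∨ ch = 'b' ∨ ch = 'c' → p ch →
      ∃ q : Nat, q < cs.length ∧ f ch = (cs.length : Int) - (q : Int) ∧
        ((cs.take q).count ch : Int) = ((cs.take i).count ch : Int) + (cs.count ch : Int) - k ∧
        cs[q]? = some ch := by
    intro ch hor hpch
    rcases hor with h | h | h <;> subst h
    · rw [hp] at hpch
      rw [pvCnt3_getD_a] at hpch
      obtain ⟨q, hq, hgq, hcq, hsq⟩ := pvCharQ cs k 'a' i hca hpch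
      refine ⟨q, hq, ?_, hcq, hsq⟩
      rw [hf]
      simp only [pvPos3_getD_a, pvCnt3_getD_a, hgq]
    · rw [hp] at hpch
      rw [pvCnt3_getD_b] at hpch
      obtain ⟨q, hq, hgq, hcq, hsq⟩ := pvCharQ cs k 'b' i hcb hpch
      refine ⟨q, hq, ?_, hcq, hsq⟩
      rw [hf]
      simp only [pvPos3_getD_b, pvCnt3_getD_b, hgq]
    · rw [hp] at hpch
      rw [pvCnt3_getD_c] at hpch
      obtain ⟨q, hq, hgq, hcq, hsq⟩ := pvCharQ cs k 'c' i hcc hpch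
      refine ⟨q, hq, ?_, hcq, hsq⟩
      rw [hf]
      simp only [pvPos3_getD_c, pvCnt3_getD_c, hgq]
  have habc : ∀ ch ∈ (['a', 'b', 'c'] : List Char), ch = 'a' ∨ ch = 'b' ∨ ch = 'c' := by
    intro ch hch
    simpa using hch
  have hub : (['a', 'b', 'c'] : List Char).foldl
      (fun j ch => if p ch then max j (f ch) else j) 0 ≤ (cs.length : Int) - (pvRho cs k i : Int) := by
    apply pvFoldMaxIf_le
    · omega
    · intro x hx hpx
      obtain ⟨q, hq, hfx, hcq, hsq⟩ := hchar x (habc x hx) hpx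
      have := hrho_le_q x q hq hsq hcq
      rw [hfx]
      omega
  have hjn : (['a', 'b', 'c'] : List Char).foldl
      (fun j ch => if p ch then max j (f ch) else j) 0 ≤ (cs.length : Int) := by
    apply pvFoldMaxIf_le
    · omega
    · intro x hx hpx
      obtain ⟨q, hq, hfx, _, _⟩ := hchar x (habc x hx) hpx
      rw [hfx]
      omega
  have hj0 : (0 : Int) ≤ (['a', 'b', 'c'] : List Char).foldl
      (fun j ch => if p ch then max j (f ch) else j) 0 := pvFoldMaxIf_ge_init _ _ _ _
  set J : Int := (['a', 'b', 'c'] : List Char).foldl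
      (fun j ch => if p ch then max j (f ch) else j) 0 with hJ
  have hlb : (cs.length : Int) - (pvRho cs k i : Int) ≤ J := by
    set m0 : Nat := ((cs.length : Int) - J).toNat with hm0s
    have hm0 : (m0 : Int) = (cs.length : Int) - J := by
      rw [hm0s, Int.toNat_of_nonneg (by omega)]
    have hm0n : m0 ≤ cs.length := by omega
    have hVm0 : pvVb cs k i m0 = true := by
      rw [pvVb_iff]
      intro ch hch
      have hor := hpre ch hch
      have hk := hkof ch hor
      by_cases hpch : p ch
      · obtain ⟨q, hq, hfx, hcq, hsq⟩ := hchar ch hor hpch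
        have hmemJ : f ch ≤ J := by
          rw [hJ]
          apply pvFoldMaxIf_ge_mem
          · rcases hor with h | h | h <;> subst h <;> simp
          · exact hpch
        rw [hfx] at hmemJ
        have hqm : m0 ≤ q := by omega
        have := pv_count_take_mono cs hqm ch
        omega
      · have hkp : k ≤ ((cs.take i).count ch : Int) := by
          rcases hor with h | h | h <;> subst h <;>
            simp only [hp, pvCnt3_getD_a, pvCnt3_getD_b, pvCnt3_getD_c] at hpch <;> omega
        have := pv_count_take_le cs m0 ch
        omega
    have := pv_le_rho cs k hm0n hVm0
    omega
  have : J = (cs.length : Int) - (pvRho cs k i : Int) := le_antisymm hub hlb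
  exact this


lemma pvCnt3_succ (cs : List Char) (i : Nat)
    (hpre : ∀ c ∈ cs, c = 'a' ∨ c = 'b' ∨ c = 'c') (hi : i < cs.length) :
    (pvCnt3 cs i).modify cs[i] 0 (· + 1) = pvCnt3 cs (i + 1) := by
  have hmem : cs[i] ∈ cs := List.getElem_mem hi
  have hrw : ∀ ch' : Char, ch' = cs[i] →
      ((cs.take i).count ch' : Int) + 1 = ((cs.take (i + 1)).count ch' : Int) := by
    intro ch' hx
    have hsucc := pv_count_take_succ cs hi ch'
    rw [if_pos hx] at hsucc
    rw [hsucc]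
    push_cast
    ring
  have hrw2 : ∀ ch' : Char, ch' ≠ cs[i] →
      ((cs.take i).count ch' : Int) = ((cs.take (i + 1)).count ch' : Int) := by
    intro ch' hx
    have hsucc := pv_count_take_succ cs hi ch'
    rw [if_neg hx] at hsucc
    rw [hsucc]
    simp
  unfold pvCnt3
  rcases hpre cs[i] hmem with hch | hch | hch <;> rw [hch]
  · rw [pvC3_modify_a, hrw 'a' hch.symm, hrw2 'b' (by rw [hch]; decide),
      hrw2 'c' (by rw [hch]; decide)]
  · rw [pvC3_modify_b, hrw 'b' hch.symm, hrw2 'a' (by rw [hch]; decide),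
      hrw2 'c' (by rw [hch]; decide)]
  · rw [pvC3_modify_c, hrw 'c' hch.symm, hrw2 'a' (by rw [hch]; decide),
      hrw2 'b' (by rw [hch]; decide)]

lemma pvOuterB (cs : List Char) (k : Int)
    (hpre : ∀ c ∈ cs, c = 'a' ∨ c = 'b' ∨ c = 'c')
    (hca : k ≤ (cs.count 'a' : Int)) (hcb : k ≤ (cs.count 'b' : Int))
    (hcc : k ≤ (cs.count 'c' : Int)) :
    ∀ (d i : Nat) (best : Int), i + d = cs.length + 1 →
    ((PySem.List.pyRange (i : Int) ((cs.length : Int) + 1) 1).foldl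
        (fun (st : Int × PySem.Dict Char Int) x =>
          let j := (['a', 'b', 'c'] : List Char).foldl
            (fun j ch =>
              let need := k - st.2.getD ch 0
              if need > 0 then
                let ps := (pvPos3 cs).getD ch []
                max j ((cs.length : Int) - PySem.List.pyGetD ps ((ps.length : Int) - need) 0)
              else j) 0
          let best := if x + j ≤ (cs.length : Int) then min st.1 (x + j) else st.1
          let cnt := if x < (cs.length : Int) ∧ st.2.contains (PySem.List.pyGetD cs x ' ')
                     then st.2.modify (PySem.List.pyGetD cs x ' ') 0 (· + 1) else st.2
          (best, cnt))
        (best, pvCnt3 cs i)).1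
      = (List.range' i d).foldl
          (fun (acc : Int) (m : Nat) => min acc ((m : Int) + (cs.length : Int) - (pvRho cs k m : Int))) best := by
  have hcnt : ∀ ch ∈ cs, k ≤ (cs.count ch : Int) := by
    intro ch hch
    rcases hpre ch hch with h | h | h <;> subst h <;> assumption
  intro d
  induction d with
  | zero =>
    intro i best hi
    rw [PySem.List.pyRange_one_eq_nil (by push_cast; omega)]
    simp [List.range']
  | succ d ihd =>
    intro i best hi
    have hin : i ≤ cs.length := by omega
    rw [PySem.List.pyRange_one_cons (by push_cast; omega)]
    rw [List.foldl_cons]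
    dsimp only
    rw [pvJeq cs k hpre hca hcb hcc i hin]
    have hrho_le := pvRho_le cs k i
    have hrho_ge := pv_l_le_rho cs k hin hcnt
    rw [if_pos (by push_cast; omega : (i : Int) + ((cs.length : Int) - (pvRho cs k i : Int)) ≤ (cs.length : Int))]
    have hcand : (i : Int) + ((cs.length : Int) - (pvRho cs k i : Int))
        = (i : Int) + (cs.length : Int) - (pvRho cs k i : Int) := by ring
    rw [hcand]
    have hcntstep : (if (i : Int) < (cs.length : Int) ∧
          (pvCnt3 cs i).contains (PySem.List.pyGetD cs (i : Int) ' ')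
        then (pvCnt3 cs i).modify (PySem.List.pyGetD cs (i : Int) ' ') 0 (· + 1)
        else pvCnt3 cs i) = pvCnt3 cs (i + 1) := by
      by_cases hilt : i < cs.length
      · have hget : PySem.List.pyGetD cs (i : Int) ' ' = cs[i] := by
          rw [PySem.List.pyGetD_natCast]
          exact List.getD_eq_getElem cs ' ' hilt
        rw [hget]
        have hcont : (pvCnt3 cs i).contains cs[i] = true := by
          unfold pvCnt3
          rw [pvC3_contains]
          rcases hpre cs[i] (List.getElem_mem hilt) with h | h | h <;> rw [h] <;> decide
        rw [if_pos ⟨by exact_mod_cast hilt, hcont⟩]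
        exact pvCnt3_succ cs i hpre hilt
      · have hieq : i = cs.length := by omega
        rw [if_neg (by push_cast; omega)]
        have h1 : ∀ ch, (cs.take i).count ch = cs.count ch :=
          fun ch => pv_count_take_of_le cs (by omega) ch
        have h2 : ∀ ch, (cs.take (i + 1)).count ch = cs.count ch :=
          fun ch => pv_count_take_of_le cs (by omega) ch
        unfold pvCnt3
        rw [h1 'a', h1 'b', h1 'c', h2 'a', h2 'b', h2 'c']
    rw [hcntstep]
    rw [show ((i : Int) + 1) = ((i + 1 : Nat) : Int) by push_cast; ring]
    rw [ihd (i + 1) _ (by omega)]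
    rw [List.range'_succ, List.foldl_cons]


-- specialized entry forms of the two loop lemmas (casts cleaned up)
lemma pvOuterA0 (cs : List Char) (k : Int)
    (hpre : ∀ c ∈ cs, c = 'a' ∨ c = 'b' ∨ c = 'c')
    (hcnt : ∀ ch ∈ cs, k ≤ (cs.count ch : Int)) :
    ((PySem.List.pyRange 0 (cs.length : Int) 1).foldl
        (fun (st : PySem.Dict Char Int × Int × Int) x =>
          let inner := innerA cs k 3 st.1 st.2.1
          let result := min st.2.2 (x + (cs.length : Int) - inner.2)
          (inner.1.modify (PySem.List.pyGetD cs x ' ') 0 (· + 1), inner.2, result))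
        (pvC3 (cs.count 'a' : Int) (cs.count 'b' : Int) (cs.count 'c' : Int), 0, (cs.length : Int))).2.2
      = (List.range' 0 cs.length).foldl
          (fun (acc : Int) (m : Nat) => min acc ((m : Int) + (cs.length : Int) - (pvRho cs k m : Int)))
          (cs.length : Int) := by
  have h := pvOuterA cs k hpre hcnt cs.length 0 0 (cs.length : Int) (by omega) (by omega)
    (pvVb_of_le cs k hcnt le_rfl)
  simp only [pvW, List.take_zero, List.count_nil, Nat.cast_zero, sub_zero, add_zero] at h
  exact h

lemma pvOuterB0 (cs : List Char) (k : Int)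
    (hpre : ∀ c ∈ cs, c = 'a' ∨ c = 'b' ∨ c = 'c')
    (hca : k ≤ (cs.count 'a' : Int)) (hcb : k ≤ (cs.count 'b' : Int))
    (hcc : k ≤ (cs.count 'c' : Int)) :
    ((PySem.List.pyRange 0 ((cs.length : Int) + 1) 1).foldl
        (fun (st : Int × PySem.Dict Char Int) x =>
          let j := (['a', 'b', 'c'] : List Char).foldl
            (fun j ch =>
              let need := k - st.2.getD ch 0
              if need > 0 then
                let ps := (pvPos3 cs).getD ch []
                max j ((cs.length : Int) - PySem.List.pyGetD ps ((ps.length : Int) - need) 0)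
              else j) 0
          let best := if x + j ≤ (cs.length : Int) then min st.1 (x + j) else st.1
          let cnt := if x < (cs.length : Int) ∧ st.2.contains (PySem.List.pyGetD cs x ' ')
                     then st.2.modify (PySem.List.pyGetD cs x ' ') 0 (· + 1) else st.2
          (best, cnt))
        ((cs.length : Int), pvCnt3 cs 0)).1
      = (List.range' 0 (cs.length + 1)).foldl
          (fun (acc : Int) (m : Nat) => min acc ((m : Int) + (cs.length : Int) - (pvRho cs k m : Int)))
          (cs.length : Int) := by
  have h := pvOuterB cs k hpre hca hcb hcc (cs.length + 1) 0 (cs.length : Int) (by omega)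
  simp only [Nat.cast_zero] at h
  exact h


-- ===== VERDICT (by name: the statement is the Claim_ definition above) =====
theorem takeCharacters_spec : Claim_equal_takeCharacters := by
  intro s k _ hpre0
  unfold Spec_takeCharacters
  unfold Pre_takeCharacters at hpre0
  have hpre : ∀ c ∈ s.toList, c = 'a' ∨ c = 'b' ∨ c = 'c' := by
    intro c hc
    have h := (List.all_eq_true.mp hpre0) c hc
    simp at h
    tauto
  simp only [takeCharacters, takeCharacters_alt]
  set cs := s.toList with hcs
  have hcl : (PySem.List.pyRange 0 (cs.length : Int) 1).foldl
      (fun d i => d.modify (PySem.List.pyGetD cs i ' ') 0 (· + 1))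
      (PySem.Dict.ofList [('a', 0), ('b', 0), ('c', 0)])
      = pvC3 (cs.count 'a' : Int) (cs.count 'b' : Int) (cs.count 'c' : Int) := by
    have h0 : PySem.Dict.ofList [('a', (0 : Int)), ('b', 0), ('c', 0)] = pvC3 0 0 0 := by decide
    rw [h0]
    rw [PySem.List.foldl_pyRange_zero_pyGetD' cs ' ' (fun d c => d.modify c 0 (· + 1)) (pvC3 0 0 0)]
    rw [pvCountLoop cs hpre 0 0 0]
    simp
  have hpos : (PySem.List.enumerate cs 0).foldl
      (fun (d : PySem.Dict Char (List Int)) p =>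
        if d.contains p.2 then d.modify p.2 [] (· ++ [p.1]) else d)
      (PySem.Dict.ofList [('a', []), ('b', []), ('c', [])]) = pvPos3 cs := by
    have h0 : PySem.Dict.ofList [('a', ([] : List Int)), ('b', []), ('c', [])] = pvP3 [] [] [] := by
      decide
    rw [h0, pvPosLoop]
    unfold pvPos3 pvOcc
    simp
  by_cases hbad : (cs.count 'a' : Int) < k ∨ (cs.count 'b' : Int) < k ∨ (cs.count 'c' : Int) < k
  · rw [hcl]
    rw [if_pos (by rw [pvC3_items]; rcases hbad with h | h | h <;> simp [h]), if_pos hbad]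
  · have hbad' := hbad
    push_neg at hbad'
    obtain ⟨hca, hcb, hcc⟩ := hbad'
    have hcnt : ∀ ch ∈ cs, k ≤ (cs.count ch : Int) := by
      intro ch hch
      rcases hpre ch hch with h | h | h <;> subst h <;> assumption
    rw [hcl]
    rw [if_neg (by rw [pvC3_items]; simp; omega), if_neg hbad]
    rw [hpos]
    rw [show ("abc".toList) = (['a', 'b', 'c'] : List Char) from rfl]
    have h0 : PySem.Dict.ofList [('a', (0 : Int)), ('b', 0), ('c', 0)] = pvC3 0 0 0 := by decide
    have h1 : pvCnt3 cs 0 = pvC3 0 0 0 := by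
      unfold pvCnt3
      simp
    rw [h0, ← h1]
    rw [pvOuterA0 cs k hpre hcnt]
    rw [pvOuterB0 cs k hpre hca hcb hcc]
    rw [List.range'_concat]
    rw [List.foldl_append]
    simp only [List.foldl_cons, List.foldl_nil, Nat.zero_add, one_mul]
    rw [pvRho_length cs k hcnt]
    have hterm : ((cs.length : Int) + (cs.length : Int) - (cs.length : Int)) = (cs.length : Int) := by
      ring
    rw [hterm]
    exact (min_eq_left (pvFoldMin_le_init _ _ _)).symm

@[simp] theorem takeCharacters_raises : Claim_raises_takeCharacters := by
  unfold Claim_raises_takeCharacters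
  refine ⟨?_, by decide, by decide, by rfl⟩
  intro s k _ hr hp
  unfold Raises_takeCharacters at hr
  unfold Pre_takeCharacters at hp
  simp only [List.any_eq_true, List.all_eq_true] at hr hp
  obtain ⟨c, hc, hne⟩ := hr
  have := hp c hc
  simp [this] at hne
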